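-- pv_equiv track=rewrite | github.com/yannickloth/W33-Theory | exploration/w33_curved_a2_refined_quadratic_bridge.py | _top_chains_step_one
-- ===== SOURCE A (Python) =====
-- from itertools import combinations, permutations
--
-- Simplex = tuple[int, ...]
--
-- Chain = tuple[Simplex, ...]
--
-- def _top_chains_step_one(facets: tuple[Simplex, ...]) -> tuple[Chain, ...]:
--     chains = []
--     for facet in facets:
--         for permutation in permutations(facet):
--             prefix: list[int] = []
--             chain: list[Simplex] = []
--             for vertex in permutation:
--                 prefix.append(vertex)
--                 chain.append(tuple(sorted(prefix)))
--             chains.append(tuple(chain))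
--     return tuple(chains)
-- ===== SOURCE B (Python) =====
-- from bisect import insort
--
--
-- def _top_chains_step_one(facets):
--     # Recursive DFS over the tree of prefixes: instead of enumerating whole
--     # permutations and rebuilding/re-sorting each prefix per permutation,
--     # extend a shared sorted prefix one vertex at a time, so the work for a
--     # common prefix is done once for all permutations sharing it.
--     chains = []
--
--     def dfs(remaining, sorted_prefix, chain):
--         if not remaining:
--             chains.append(tuple(chain))
--             return
--         for i in range(len(remaining)):
--             new_prefix = list(sorted_prefix)
--             insort(new_prefix, remaining[i])
--             dfs(remaining[:i] + remaining[i + 1:], new_prefix,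
--                 chain + (tuple(new_prefix),))
--
--     for facet in facets:
--         dfs(list(facet), [], ())
--     return tuple(chains)
-- ===== Notes on version B (the rewrite author's own statement) =====
-- stated objective: faster
-- what changed: B replaces A's enumerate-every-permutation-and-re-sort-each-prefix loop by a recursive DFS over the tree of prefixes that carries an invariant-sorted prefix and the chain-so-far, so the sorted prefix of each shared prefix node is computed once for all permutations sharing it instead of once per permutation per step.
import Mathlib
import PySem

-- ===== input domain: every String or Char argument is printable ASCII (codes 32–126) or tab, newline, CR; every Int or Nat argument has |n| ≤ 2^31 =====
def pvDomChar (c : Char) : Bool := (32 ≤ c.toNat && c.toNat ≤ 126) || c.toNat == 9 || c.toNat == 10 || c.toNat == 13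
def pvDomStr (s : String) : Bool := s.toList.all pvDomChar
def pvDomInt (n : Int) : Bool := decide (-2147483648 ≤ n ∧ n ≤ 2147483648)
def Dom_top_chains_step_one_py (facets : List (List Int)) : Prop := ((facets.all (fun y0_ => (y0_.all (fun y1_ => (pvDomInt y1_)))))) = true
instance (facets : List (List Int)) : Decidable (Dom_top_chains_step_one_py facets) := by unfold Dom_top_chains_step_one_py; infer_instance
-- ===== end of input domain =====

-- B replaces A's enumerate-all-permutations-then-re-sort-every-prefix loops by a
-- recursive DFS over the tree of prefixes that carries an invariant-sorted prefix,
-- so each shared prefix is processed once (objective: faster).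

-- ===== PORT A =====
-- per permutation: prefix.append(vertex); chain.append(tuple(sorted(prefix)))
def pvStepA (st : List Int × List (List Int)) (vertex : Int) : List Int × List (List Int) :=
  let p := st.1 ++ [vertex]
  (p, st.2 ++ [PySem.List.sorted p (fun x => x)])

def top_chains_step_one_py (facets : List (List Int)) : List (List (List Int)) :=
  facets.foldl (fun chains facet =>
    (PySem.List.permutations facet facet.length).foldl (fun chains permutation =>
      chains ++ [(permutation.foldl pvStepA ([], [])).2]) chains) []

-- ===== PORT B =====
-- dfs(remaining, sorted_prefix, chain): if remaining is empty, emit chain; else,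
-- for each i ('for i in range(len(remaining))', transcribed as recursion on the
-- splits remaining = left ++ v :: rs), insort remaining[i] into a copy of
-- sorted_prefix and recurse on remaining[:i] + remaining[i+1:].
mutual
def pvDfs : List Int → List Int → List (List Int) → List (List (List Int)) → List (List (List Int))
  | [], _, chain, chains => chains ++ [chain]
  | h :: t, sorted_prefix, chain, chains => pvSelect [] (h :: t) sorted_prefix chain chains
termination_by remaining _ _ _ => (remaining.length, remaining.length + 1)
decreasing_by simp [Prod.lex_def]

def pvSelect : List Int → List Int → List Int → List (List Int) → List (List (List Int)) → List (List (List Int))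
  | _, [], _, _, chains => chains
  | left, v :: rs, sorted_prefix, chain, chains =>
    let np := PySem.List.insertBy (fun a b => decide (a < b)) v sorted_prefix
    pvSelect (left ++ [v]) rs sorted_prefix chain
      (pvDfs (left ++ rs) np (chain ++ [np]) chains)
termination_by left right _ _ _ => (left.length + right.length, right.length)
decreasing_by all_goals (simp [Prod.lex_def]; try omega)
end

def top_chains_step_one_py_alt (facets : List (List Int)) : List (List (List Int)) :=
  facets.foldl (fun chains facet => pvDfs facet [] [] chains) []

-- ===== PRECONDITION & SPEC =====
def Spec_top_chains_step_one_py (facets : List (List Int)) (out : List (List (List Int))) : Prop := out = top_chains_step_one_py_alt facets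
instance (facets : List (List Int)) (out : List (List (List Int))) : Decidable (Spec_top_chains_step_one_py facets out) := by unfold Spec_top_chains_step_one_py; infer_instance

-- ===== CLAIM =====
def Claim_equal_top_chains_step_one_py : Prop := ∀ (facets : List (List Int)), Dom_top_chains_step_one_py facets → Spec_top_chains_step_one_py facets (top_chains_step_one_py facets)

-- ===== LEMMAS AND PROOFS =====

-- the chain emitted below a node whose sorted prefix is sp, along a permutation vs
def pvChainB (vs : List Int) (sp : List Int) : List (List Int) :=
  match vs with
  | [] => []
  | v :: rest =>
    let np := PySem.List.insertBy (fun a b => decide (a < b)) v sp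
    np :: pvChainB rest np

-- one branch of PySem.List.permutations: pick index i of xs, then r more
def pvPick (xs : List Int) (r : Nat) (i : Nat) : List (List Int) :=
  match xs[i]? with
  | none => []
  | some v => (PySem.List.permutations (xs.eraseIdx i) r).map (fun p => v :: p)

-- the permutations produced by iterating over the splits left ++ v :: rs
def pvSplits (left right : List Int) : List (List Int) :=
  match right with
  | [] => []
  | v :: rs =>
    ((PySem.List.permutations (left ++ rs) (left ++ rs).length).map (fun p => v :: p))
      ++ pvSplits (left ++ [v]) rs

-- insort into an already-sorted list = re-sort after an append
theorem pv_insort_sorted (p : List Int) (v : Int) :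
    PySem.List.insertBy (fun a b => decide (a < b)) v (PySem.List.sorted p (fun x => x))
      = PySem.List.sorted (p ++ [v]) (fun x => x) := by
  rw [PySem.List.sorted_eq_foldl_insertBy, PySem.List.sorted_eq_foldl_insertBy]
  simp [List.foldl_append]

theorem pv_perm_succ (xs : List Int) (r : Nat) :
    PySem.List.permutations xs (r + 1) = (List.range xs.length).flatMap (pvPick xs r) := by
  rw [PySem.List.permutations]
  refine congrArg (fun f => List.flatMap f (List.range xs.length)) (funext fun i => ?_)
  cases h : xs[i]? <;> simp [pvPick, h]

theorem pv_eraseIdx_mid (v : Int) (rs : List Int) (left : List Int) :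
    (left ++ v :: rs).eraseIdx left.length = left ++ rs := by
  induction left with
  | nil => rfl
  | cons x xs ih => simp only [List.cons_append, List.length_cons, List.eraseIdx, ih]

theorem pv_flatMap_shift (g : Nat → List (List Int)) (n : Nat) :
    ((List.range n).map Nat.succ).flatMap g = (List.range n).flatMap (fun j => g (j + 1)) := by
  induction n with
  | zero => rfl
  | succ m ih => simp [List.range_succ, ih]

theorem pv_splits_eq (right : List Int) : ∀ (left : List Int),
    pvSplits left right
      = (List.range right.length).flatMap (fun j =>
          pvPick (left ++ right) ((left ++ right).length - 1) (left.length + j)) := by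
  induction right with
  | nil => intro left; simp [pvSplits]
  | cons v rs ih =>
    intro left
    rw [pvSplits, ih (left ++ [v]), List.length_cons, List.range_succ_eq_map,
        List.flatMap_cons, pv_flatMap_shift]
    congr 1
    · have h0 : (left ++ v :: rs)[left.length]? = some v := by
        simp
      have hlen : (left ++ v :: rs).length - 1 = (left ++ rs).length := by simp
      simp [pvPick, pv_eraseIdx_mid]
    · refine congrArg (fun f => List.flatMap f (List.range rs.length)) (funext fun j => ?_)
      have hlist : (left ++ [v]) ++ rs = left ++ v :: rs := by simp
      have hidx : (left ++ [v]).length + j = left.length + (j + 1) := by simp; omega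
      rw [hlist, hidx]

-- A's inner loop produces exactly pvChainB of the sorted prefix
theorem pv_chainB_eq (vs : List Int) : ∀ (p : List Int) (c : List (List Int)),
    (vs.foldl pvStepA (p, c)).2
      = c ++ pvChainB vs (PySem.List.sorted p (fun x => x)) := by
  induction vs with
  | nil => intro p c; simp [pvChainB]
  | cons v rest ih =>
    intro p c
    simp only [List.foldl_cons, pvStepA]
    rw [ih (p ++ [v]) (c ++ [PySem.List.sorted (p ++ [v]) (fun x => x)])]
    simp [pvChainB, pv_insort_sorted]

theorem pv_dfs_spec : ∀ (n : Nat) (remaining : List Int), remaining.length = n →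
    ∀ (sp : List Int) (chain : List (List Int)) (chains : List (List (List Int))),
    pvDfs remaining sp chain chains
      = chains ++ (PySem.List.permutations remaining remaining.length).map
          (fun p => chain ++ pvChainB p sp) := by
  intro n
  induction n using Nat.strong_induction_on with
  | _ n IH =>
    have hsel : ∀ (right left : List Int), left.length + right.length = n →
        ∀ (sp : List Int) (chain : List (List Int)) (chains : List (List (List Int))),
        pvSelect left right sp chain chains
          = chains ++ (pvSplits left right).map (fun p => chain ++ pvChainB p sp) := by
      intro right
      induction right with
      | nil =>
        intro left _ sp chain chains
        rw [pvSelect.eq_def]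
        simp [pvSplits]
      | cons v rs ihr =>
        intro left hn sp chain chains
        rw [pvSelect.eq_def]
        simp only []
        have hlen : (left ++ rs).length < n := by simp at hn ⊢; omega
        rw [ihr (left ++ [v]) (by simp at hn ⊢; omega)]
        rw [IH (left ++ rs).length hlen (left ++ rs) rfl]
        rw [pvSplits, List.map_append, List.map_map, List.append_assoc]
        congr 2
        apply List.map_congr_left
        intro p _
        simp [pvChainB, Function.comp]
    intro remaining hrem sp chain chains
    match remaining with
    | [] =>
      rw [pvDfs.eq_def]
      simp [pvChainB]
    | x :: xs =>
      rw [pvDfs.eq_def]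
      simp only []
      rw [hsel (x :: xs) [] (by simp at hrem ⊢; omega)]
      congr 2
      rw [pv_splits_eq (x :: xs) []]
      have h1 : (x :: xs).length = xs.length + 1 := rfl
      rw [h1, pv_perm_succ (x :: xs) xs.length]
      simp

theorem pv_facet (facet : List Int) (chains : List (List (List Int))) :
    (PySem.List.permutations facet facet.length).foldl
        (fun ch perm => ch ++ [(perm.foldl pvStepA ([], [])).2]) chains
      = pvDfs facet [] [] chains := by
  rw [pv_dfs_spec facet.length facet rfl]
  have hf : ∀ (l : List (List Int)) (acc : List (List (List Int))),
      l.foldl (fun ch perm => ch ++ [(perm.foldl pvStepA ([], [])).2]) acc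
        = acc ++ l.map (fun perm => (perm.foldl pvStepA ([], [])).2) := by
    intro l
    induction l with
    | nil => intro acc; simp
    | cons y ys ih => intro acc; simp [ih]
  rw [hf]
  congr 1
  apply List.map_congr_left
  intro p _
  rw [pv_chainB_eq p [] []]
  rfl

-- ===== VERDICT =====
theorem top_chains_step_one_py_spec : Claim_equal_top_chains_step_one_py := by
  intro facets _
  unfold Spec_top_chains_step_one_py top_chains_step_one_py top_chains_step_one_py_alt
  have h : (fun (chains : List (List (List Int))) facet =>
      (PySem.List.permutations facet facet.length).foldl
        (fun chains permutation => chains ++ [(permutation.foldl pvStepA ([], [])).2]) chains)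
      = fun chains facet => pvDfs facet [] [] chains :=
    funext fun chains => funext fun facet => pv_facet facet chains
  rw [h]
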